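-- pv_equiv track=rewrite | github.com/ryeongse25/algorithm | 프로그래머스/unrated/120921. 문자열 밀기/문자열 밀기.py | solution
-- ===== SOURCE A (Python) =====
-- def solution(A, B):
--     if A == B:
--         return 0
--
--     words = []
--
--     for i in range(len(A)):
--         words.append(A[i:] + A[:i])
--
--     words.reverse()
--
--     return words.index(B) + 1 if B in words else -1
-- ===== SOURCE B (Python) =====
-- def solution(A, B):
--     # rotations of A needed to match B: search B in A+A instead of building all rotations
--     if A == B:
--         return 0
--     if len(A) != len(B):
--         return -1
--     i = (A + A).rfind(B)
--     return -1 if i == -1 else len(A) - i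
-- ===== Notes on version B (the rewrite author's own statement) =====
-- stated objective: faster
-- what changed: Instead of materialising all n rotations of A and scanning the reversed list for B, B checks lengths and locates B's rightmost occurrence in A+A with str.rfind, returning len(A) minus that index.
import Mathlib
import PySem

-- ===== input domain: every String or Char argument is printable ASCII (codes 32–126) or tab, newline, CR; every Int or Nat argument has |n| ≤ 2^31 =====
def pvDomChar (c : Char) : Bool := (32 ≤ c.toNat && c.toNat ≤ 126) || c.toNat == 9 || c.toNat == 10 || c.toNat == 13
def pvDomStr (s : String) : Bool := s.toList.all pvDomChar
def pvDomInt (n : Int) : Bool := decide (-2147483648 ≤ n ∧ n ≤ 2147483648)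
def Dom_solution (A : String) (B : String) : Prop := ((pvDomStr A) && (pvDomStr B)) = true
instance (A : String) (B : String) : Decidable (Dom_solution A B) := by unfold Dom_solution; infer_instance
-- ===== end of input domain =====

-- B replaces A's "build all n rotations, reverse, list-index" with a length check plus a
-- single rightmost-occurrence search of B in A+A (str.rfind); objective: faster.

-- ===== PORT A =====
def solution (A : String) (B : String) : Int :=
  if A = B then 0
  else
    let a := A.toList
    let words : List (List Char) :=
      (PySem.List.pyRange 0 (PySem.Chars.len a : Int) 1).foldl
        (fun ws i => ws ++ [PySem.List.slice a (some i) none ++ PySem.List.slice a none (some i)]) []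
    let words := words.reverse
    if words.contains B.toList then ((PySem.List.index? words B.toList).getD 0 : Int) + 1 else -1

-- ===== PORT B =====
def solution_alt (A : String) (B : String) : Int :=
  if A = B then 0
  else if PySem.Chars.len A.toList ≠ PySem.Chars.len B.toList then -1
  else
    let i := PySem.Chars.rfind (A.toList ++ A.toList) B.toList
    if i = -1 then -1 else (PySem.Chars.len A.toList : Int) - i

-- ===== PRECONDITION & SPEC =====
def Spec_solution (A : String) (B : String) (out : Int) : Prop := out = solution_alt A B
instance (A : String) (B : String) (out : Int) : Decidable (Spec_solution A B out) := by unfold Spec_solution; infer_instance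

-- ===== CLAIM (what is proved, stated in full; the proofs are below) =====
def Claim_equal_solution : Prop := ∀ (A : String) (B : String), Dom_solution A B → Spec_solution A B (solution A B)

-- ===== LEMMAS AND PROOFS =====

/-- The k-th left rotation of `a` (what `A[i:] + A[:i]` builds). -/
def pvRot (a : List Char) (k : Nat) : List Char := a.drop k ++ a.take k

theorem pvRot_length (a : List Char) (k : Nat) (hk : k ≤ a.length) :
    (pvRot a k).length = a.length := by
  simp [pvRot]; omega

theorem words_eq (a : List Char) :
    (PySem.List.pyRange 0 (PySem.Chars.len a : Int) 1).foldl
        (fun ws i => ws ++ [PySem.List.slice a (some i) none ++ PySem.List.slice a none (some i)]) []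
      = (List.range a.length).map (pvRot a) := by
  rw [PySem.List.foldl_append_singleton_eq_map, PySem.List.pyRange_one]
  simp [pvRot, List.map_map, Function.comp_def, PySem.List.slice_from_natCast,
    PySem.List.slice_to_natCast]

theorem prefix_iff (a b : List Char) (p : Nat) (hb : b.length = a.length) (hp : p ≤ a.length) :
    b.isPrefixOf ((a ++ a).drop p) = true ↔ b = pvRot a p := by
  rw [List.isPrefixOf_iff_prefix, List.prefix_iff_eq_take]
  have h1 : (a ++ a).drop p = a.drop p ++ a := by
    rw [List.drop_append_of_le_length hp]
  rw [h1, hb, List.take_append]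
  have h2 : a.length - (a.drop p).length = p := by simp; omega
  have h3 : List.take a.length (a.drop p) = a.drop p := by
    apply List.take_of_length_le; simp
  rw [h2, h3, pvRot]

theorem go_succ (s b : List Char) (q : Nat) :
    PySem.Chars.rfind.go s b (q + 1)
      = if b.isPrefixOf (s.drop (q + 1)) then ((q : Int) + 1) else PySem.Chars.rfind.go s b q := by
  rw [PySem.Chars.rfind.go]
  split <;> simp_all

theorem go_zero (s b : List Char) :
    PySem.Chars.rfind.go s b 0 = if b.isPrefixOf s then 0 else -1 := by
  rw [PySem.Chars.rfind.go]

theorem go_high (a b : List Char) (hb : b.length = a.length) (hne : b ≠ a) (h1 : 1 ≤ a.length) :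
    ∀ k : Nat, PySem.Chars.rfind.go (a ++ a) b (a.length + k)
      = PySem.Chars.rfind.go (a ++ a) b (a.length - 1) := by
  intro k
  induction k with
  | zero =>
    obtain ⟨m, hm⟩ : ∃ m, a.length = m + 1 := ⟨a.length - 1, by omega⟩
    rw [Nat.add_zero]
    conv_lhs => rw [hm]
    rw [go_succ]
    have hd : (a ++ a).drop (m + 1) = a := by
      rw [← hm, List.drop_append_of_le_length (le_refl _)]; simp
    have hpre : b.isPrefixOf ((a ++ a).drop (m + 1)) = false := by
      rw [hd]
      by_contra h
      have h2 : b.isPrefixOf a = true := by simpa using h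
      rw [List.isPrefixOf_iff_prefix, List.prefix_iff_eq_take] at h2
      exact hne (by rw [h2, hb, List.take_length])
    rw [hpre]
    simp [hm]
  | succ k ih =>
    have hstep : a.length + (k + 1) = (a.length + k) + 1 := rfl
    rw [hstep, go_succ]
    have hpre : b.isPrefixOf ((a ++ a).drop (a.length + k + 1)) = false := by
      by_contra h
      have h2 : b <+: (a ++ a).drop (a.length + k + 1) := by simpa using h
      have h3 := h2.length_le
      simp at h3
      omega
    rw [hpre]
    exact ih

theorem go_scan (a b : List Char) (hb : b.length = a.length) :
    ∀ p : Nat, p < a.length →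
      (match PySem.List.index? (((List.range (p + 1)).map (pvRot a)).reverse) b with
        | some j => PySem.Chars.rfind.go (a ++ a) b p = (p : Int) - j
        | none => PySem.Chars.rfind.go (a ++ a) b p = -1) := by
  intro p
  induction p with
  | zero =>
    intro hp
    have h0 : ((List.range 1).map (pvRot a)).reverse = [pvRot a 0] := by simp
    rw [h0, go_zero]
    have hiff := prefix_iff a b 0 hb (by omega)
    simp only [List.drop_zero] at hiff
    by_cases hba : b = pvRot a 0
    · have h1 : PySem.List.index? [pvRot a 0] b = some 0 := by
        rw [hba]; exact PySem.List.index?_cons_self _ _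
      simp only [h1]
      rw [if_pos (hiff.mpr hba)]
      simp
    · have h1 : PySem.List.index? [pvRot a 0] b = none := by
        rw [PySem.List.index?_eq_none_iff]; simp [Ne.symm, hba]
      simp only [h1]
      rw [if_neg (by simp [hiff, hba])]
  | succ p ih =>
    intro hp
    have hcons : ((List.range (p + 2)).map (pvRot a)).reverse
        = pvRot a (p + 1) :: ((List.range (p + 1)).map (pvRot a)).reverse := by
      rw [List.range_succ]; simp
    rw [hcons, go_succ]
    have hiff := prefix_iff a b (p + 1) hb (by omega)
    by_cases hba : b = pvRot a (p + 1)
    · have h1 : PySem.List.index? (pvRot a (p+1) :: ((List.range (p + 1)).map (pvRot a)).reverse) b = some 0 := by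
        rw [hba]; exact PySem.List.index?_cons_self _ _
      simp only [h1]
      rw [if_pos (hiff.mpr hba)]
      simp
    · have hne : pvRot a (p+1) ≠ b := Ne.symm hba
      rw [PySem.List.index?_cons_of_ne (h := hne), if_neg (by simp [hiff, hba])]
      have hih := ih (by omega)
      cases hidx : PySem.List.index? (((List.range (p + 1)).map (pvRot a)).reverse) b with
      | some j =>
        rw [hidx] at hih
        simp only [Option.map_some]
        rw [hih]
        push_cast
        ring
      | none =>
        rw [hidx] at hih
        simp only [Option.map_none]
        exact hih

-- ===== VERDICT (by name: the statement is the Claim_ definition above) =====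
theorem solution_spec : Claim_equal_solution := by
  intro A B _
  unfold Spec_solution
  by_cases hAB : A = B
  · simp [solution, solution_alt, hAB]
  · simp only [solution, solution_alt, if_neg hAB]
    rw [words_eq]
    by_cases hlen : B.toList.length = A.toList.length
    · -- equal lengths
      have hn1 : 1 ≤ A.toList.length := by
        by_contra h
        have ha : A.toList = [] := by
          cases h' : A.toList <;> simp_all
        have hb : B.toList = [] := by
          have := hlen; rw [ha] at this; simpa using this
        exact hAB (String.toList_inj.mp (by rw [ha, hb]))
      have hba : B.toList ≠ A.toList := fun h => hAB (String.toList_inj.mp h).symm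
      have hrfind : PySem.Chars.rfind (A.toList ++ A.toList) B.toList
          = PySem.Chars.rfind.go (A.toList ++ A.toList) B.toList (A.toList.length - 1) := by
        have hlen2 : (A.toList ++ A.toList).length = A.toList.length + A.toList.length := by simp
        rw [PySem.Chars.rfind, hlen2]
        exact go_high A.toList B.toList hlen hba hn1 A.toList.length
      have hscan := go_scan A.toList B.toList hlen (A.toList.length - 1) (by omega)
      have hrange : (A.toList.length - 1) + 1 = A.toList.length := by omega
      rw [hrange] at hscan
      cases hidx : PySem.List.index?
          (((List.range A.toList.length).map (pvRot A.toList)).reverse) B.toList with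
      | some j =>
        rw [hidx] at hscan
        have hmem : B.toList ∈ ((List.range A.toList.length).map (pvRot A.toList)).reverse := by
          have := (PySem.List.index?_isSome_iff
            (((List.range A.toList.length).map (pvRot A.toList)).reverse) B.toList)
          rw [hidx] at this
          exact this.mp rfl
        obtain ⟨hjlt, -, -⟩ := PySem.List.getElem_of_index?_eq_some hidx
        have hjn : j < A.toList.length := by simpa using hjlt
        rw [if_pos (List.elem_eq_true_of_mem hmem)]
        rw [if_neg (show ¬(PySem.Chars.len A.toList ≠ PySem.Chars.len B.toList) by
          simp only [PySem.Chars.len_eq]; omega)]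
        rw [hrfind, hscan]
        rw [if_neg (show ¬(((A.toList.length - 1 : Nat) : Int) - (j : Int) = -1) by omega)]
        simp only [Option.getD_some, PySem.Chars.len_eq]
        omega
      | none =>
        rw [hidx] at hscan
        have hnmem : B.toList ∉ ((List.range A.toList.length).map (pvRot A.toList)).reverse :=
          List.idxOf?_eq_none_iff.mp hidx
        rw [if_neg (show ¬((((List.range A.toList.length).map (pvRot A.toList)).reverse).contains B.toList = true) by
          simp only [List.contains_eq_mem, decide_eq_true_eq]; exact hnmem)]
        rw [if_neg (show ¬(PySem.Chars.len A.toList ≠ PySem.Chars.len B.toList) by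
          simp only [PySem.Chars.len_eq]; omega)]
        rw [hrfind, hscan, if_pos rfl]
    · -- lengths differ: rotation list cannot contain B; B's port stops at the length check
      have hnmem : B.toList ∉ ((List.range A.toList.length).map (pvRot A.toList)).reverse := by
        intro h
        rw [List.mem_reverse, List.mem_map] at h
        obtain ⟨k, hk, hr⟩ := h
        rw [List.mem_range] at hk
        exact hlen (by rw [← hr, pvRot_length A.toList k (le_of_lt hk)])
      rw [if_neg (show ¬((((List.range A.toList.length).map (pvRot A.toList)).reverse).contains B.toList = true) by
        simp only [List.contains_eq_mem, decide_eq_true_eq]; exact hnmem)]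
      rw [if_pos (show (PySem.Chars.len A.toList ≠ PySem.Chars.len B.toList) by
        simp only [PySem.Chars.len_eq]; omega)]
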